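-- pv_equiv track=rewrite | github.com/Kylea650/advent-of-code-2022 | python/day10/day10.1.py | get_running_totals
-- ===== SOURCE A (Python) =====
-- def get_running_totals(instructions: list[str]) -> dict[int:str]:
--     counter = 1
--     running_total = {}
--
--     for i, v in enumerate(instructions):
--
--         if v[:4] == "addx":
--             counter += int(v[5:])
--
--         running_total[i + 2] = counter
--
--     return running_total
-- ===== SOURCE B (Python) =====
-- def get_running_totals(instructions: list[str]) -> dict:
--     return {
--         i + 2: 1 + sum(int(v[5:]) for v in instructions[: i + 1] if v[:4] == "addx")
--         for i in range(len(instructions))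
--     }
-- ===== Notes on version B (the rewrite author's own statement) =====
-- stated objective: alternative
-- what changed: Replaces A's stateful single pass (a counter threaded through the loop and per-iteration dict insertion) by a stateless closed form: each key i+2 is computed independently as 1 plus the sum of the parsed addx payloads in the prefix instructions[:i+1], built in one dict comprehension.
import Mathlib
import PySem

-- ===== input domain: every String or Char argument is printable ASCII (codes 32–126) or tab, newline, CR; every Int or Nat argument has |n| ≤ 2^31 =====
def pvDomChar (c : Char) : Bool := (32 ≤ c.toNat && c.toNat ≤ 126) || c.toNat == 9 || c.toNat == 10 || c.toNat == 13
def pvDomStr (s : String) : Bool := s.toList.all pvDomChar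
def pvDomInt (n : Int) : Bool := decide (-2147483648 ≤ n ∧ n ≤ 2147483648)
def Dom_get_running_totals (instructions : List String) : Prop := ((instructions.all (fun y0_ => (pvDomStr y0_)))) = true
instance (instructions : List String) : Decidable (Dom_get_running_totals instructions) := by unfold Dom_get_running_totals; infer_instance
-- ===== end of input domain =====

-- B replaces A's stateful counter loop by a stateless dict comprehension: each key i+2 is
-- computed independently as 1 + sum of addx payloads in instructions[:i+1] (alternative, O(n^2)).

-- ===== PORT A =====
-- literal port of A's loop: state = (counter, running_total dict); int(v[5:]) is
-- PySem.Int.ofStr?, total via .getD 0 — Pre_ excludes the inputs where it is none (ValueError).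
def get_running_totals (instructions : List String) : List (Int × Int) :=
  let r := (PySem.List.enumerate instructions).foldl
    (fun (st : Int × PySem.Dict Int Int) iv =>
      let counter :=
        if PySem.Str.slice iv.2 none (some 4) = "addx" then
          st.1 + (PySem.Int.ofStr? (PySem.Str.slice iv.2 (some 5) none)).getD 0
        else st.1
      (counter, st.2.insert (iv.1 + 2) counter))
    (1, PySem.Dict.empty)
  r.2.items

-- ===== PORT B =====
-- literal port of Source B: one dict comprehension over range(len(instructions)); per key i+2 the
-- value is 1 + sum of the generator (filter the prefix instructions[:i+1] by the addx test,
-- map int(v[5:]) over it, sum). Keys i+2 are distinct, so the dict's items are this list.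
def get_running_totals_alt (instructions : List String) : List (Int × Int) :=
  (PySem.List.pyRange 0 (PySem.List.len instructions) 1).map (fun i =>
    (i + 2,
     1 + (((PySem.List.slice instructions none (some (i + 1))).filter
             (fun v => PySem.Str.slice v none (some 4) == "addx")).map
           (fun v => (PySem.Int.ofStr? (PySem.Str.slice v (some 5) none)).getD 0)).sum))

-- ===== PRECONDITION & SPEC =====
-- Pre_ excludes exactly the inputs where A raises ValueError: an "addx"-prefixed instruction
-- whose payload v[5:] is not an int literal (B raises there too).
def Pre_get_running_totals (instructions : List String) : Prop :=
  ∀ v ∈ instructions, PySem.Str.slice v none (some 4) = "addx" →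
    (PySem.Int.ofStr? (PySem.Str.slice v (some 5) none)).isSome = true
instance (instructions : List String) : Decidable (Pre_get_running_totals instructions) := by
  unfold Pre_get_running_totals; infer_instance
def pvWitness_get_running_totals : List String := ["addx 3", "noop", "addx -5"]
def Spec_get_running_totals (instructions : List String) (out : List (Int × Int)) : Prop := out = get_running_totals_alt instructions
instance (instructions : List String) (out : List (Int × Int)) : Decidable (Spec_get_running_totals instructions out) := by unfold Spec_get_running_totals; infer_instance

-- ===== CLAIM (what is proved, stated in full; the proofs are below) =====
def Claim_equal_get_running_totals : Prop := ∀ (instructions : List String), Dom_get_running_totals instructions → Pre_get_running_totals instructions → Spec_get_running_totals instructions (get_running_totals instructions)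

-- ===== LEMMAS AND PROOFS =====

-- the per-instruction delta (shared closed form of both sides' contribution)
def pvDelta (v : String) : Int :=
  if PySem.Str.slice v none (some 4) = "addx" then
    (PySem.Int.ofStr? (PySem.Str.slice v (some 5) none)).getD 0
  else 0

-- invariant of A's loop: from start index s, counter c and a dict whose keys are all < s + 2,
-- the fold appends the pairs (s+k+2, c + sum of the first k+1 deltas).
theorem pvFoldA (l : List String) (s c : Int) (d : PySem.Dict Int Int)
    (hk : ∀ k ∈ d.keys, k < s + 2) :
    ((PySem.List.enumerate l s).foldl
      (fun (st : Int × PySem.Dict Int Int) iv =>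
        let counter :=
          if PySem.Str.slice iv.2 none (some 4) = "addx" then
            st.1 + (PySem.Int.ofStr? (PySem.Str.slice iv.2 (some 5) none)).getD 0
          else st.1
        (counter, st.2.insert (iv.1 + 2) counter))
      (c, d)).2.items
    = d.items ++ (List.range l.length).map
        (fun (k : Nat) => ((s + k + 2 : Int), c + ((l.map pvDelta).take (k + 1)).sum)) := by
  induction l generalizing s c d with
  | nil => simp [PySem.List.enumerate_nil]
  | cons v l ih =>
    rw [PySem.List.enumerate_cons]
    simp only [List.foldl_cons]
    have hstep : (if PySem.Str.slice v none (some 4) = "addx" then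
          c + (PySem.Int.ofStr? (PySem.Str.slice v (some 5) none)).getD 0
        else c) = c + pvDelta v := by
      unfold pvDelta; split_ifs <;> simp
    have hcon : d.contains (s + 2) = false := by
      by_contra h
      have : d.contains (s + 2) = true := by
        cases hcb : d.contains (s + 2) with
        | true => rfl
        | false => exact absurd hcb h
      have := (PySem.Dict.contains_iff_mem_keys d (s + 2)).mp this
      have := hk _ this
      omega
    have hk' : ∀ k ∈ (d.insert (s + 2) (c + pvDelta v)).keys, k < (s + 1) + 2 := by
      intro k hkm
      rcases (PySem.Dict.mem_keys_insert d (s + 2) k (c + pvDelta v)).mp hkm with h | h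
      · omega
      · have := hk k h; omega
    have := ih (s + 1) (c + pvDelta v) (d.insert (s + 2) (c + pvDelta v)) hk'
    simp only [hstep] at this ⊢
    rw [this, PySem.Dict.items_insert_of_not_contains _ _ hcon]
    rw [List.length_cons, List.range_succ_eq_map]
    rw [List.map_cons, List.map_map, List.append_assoc, List.singleton_append]
    congr 1
    congr 1
    · simp
    · apply List.map_congr_left
      intro a _
      simp only [Function.comp_apply, List.map_cons, List.take_succ_cons, List.sum_cons,
        Prod.mk.injEq]
      constructor
      · push_cast; ring
      · ring

-- the generator's filter+map sum equals the sum of pvDelta over the same list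
theorem pvFilterSum (l : List String) :
    ((l.filter (fun v => PySem.Str.slice v none (some 4) == "addx")).map
       (fun v => (PySem.Int.ofStr? (PySem.Str.slice v (some 5) none)).getD 0)).sum
    = (l.map pvDelta).sum := by
  induction l with
  | nil => simp
  | cons v l ih =>
    simp only [List.map_cons, List.sum_cons, List.filter_cons, beq_iff_eq]
    by_cases h : PySem.Str.slice v none (some 4) = "addx"
    · rw [if_pos h]
      simp only [List.map_cons, List.sum_cons, ih, pvDelta, if_pos h]
    · rw [if_neg h]
      simp only [ih, pvDelta, if_neg h, zero_add]

-- B equals the same closed form as A's loop (at s = 0, c = 1)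
theorem pvAltEq (l : List String) :
    get_running_totals_alt l
    = (List.range l.length).map
        (fun (k : Nat) => (((k : Int) + 2 : Int), 1 + ((l.map pvDelta).take (k + 1)).sum)) := by
  unfold get_running_totals_alt
  simp only [PySem.List.len_eq]
  rw [PySem.List.pyRange_one]
  have h0 : (((l.length : Int)) - 0).toNat = l.length := by omega
  rw [h0, List.map_map]
  apply List.map_congr_left
  intro k _
  simp only [Function.comp_apply, Prod.mk.injEq]
  have hsl : PySem.List.slice l none (some ((0 : Int) + (k : Int) + 1)) = l.take (k + 1) := by
    have hb : (0 : Int) + (k : Int) + 1 = ((k + 1 : Nat) : Int) := by push_cast; ring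
    rw [hb, PySem.List.slice_to_natCast]
  refine ⟨by ring, ?_⟩
  rw [hsl, pvFilterSum, List.map_take]

-- ===== VERDICT (by name: the statement is the Claim_ definition above) =====
theorem get_running_totals_spec : Claim_equal_get_running_totals := by
  intro instructions _ _
  unfold Spec_get_running_totals get_running_totals
  rw [pvAltEq]
  have := pvFoldA instructions 0 1 PySem.Dict.empty (by simp [PySem.Dict.keys_empty])
  rw [this]
  simp [PySem.Dict.empty]
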